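-- pv_equiv track=rewrite | github.com/x1710927987/2026-certificate-authority-cup | question_1/basic_model_result_for_question_1/basic_model_for_question_1.py | build_interleaved_schedule
-- ===== SOURCE A (Python) =====
-- from dataclasses import dataclass, asdict
-- from typing import Dict, List, Tuple
--
-- @dataclass
-- class CellInfo:
--     part_id: str
--     layer_id: int
--     cell_id: str
--     scan_length_mm: float
--     cell_type: str
--
-- def build_interleaved_schedule(layers: Dict[Tuple[str, int], List[CellInfo]]) -> List[Tuple[str, int]]:
--     parts = sorted({part_id for part_id, _ in layers})
--     all_layer_ids = sorted({layer_id for _, layer_id in layers})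
--     schedule: List[Tuple[str, int]] = []
--     for layer_id in all_layer_ids:
--         for part_id in parts:
--             key = (part_id, layer_id)
--             if key in layers:
--                 schedule.append(key)
--     return schedule
-- ===== SOURCE B (Python) =====
-- def build_interleaved_schedule(layers):
--     return sorted(layers, key=lambda key: (key[1], key[0]))
-- ===== Notes on version B (the rewrite author's own statement) =====
-- stated objective: simpler
-- what changed: Replaces A's nested loop over the full sorted parts x layers grid (with a membership test per pair) by a single sort of the existing keys with key (layer_id, part_id), avoiding the P*L grid scan.
import Mathlib
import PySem

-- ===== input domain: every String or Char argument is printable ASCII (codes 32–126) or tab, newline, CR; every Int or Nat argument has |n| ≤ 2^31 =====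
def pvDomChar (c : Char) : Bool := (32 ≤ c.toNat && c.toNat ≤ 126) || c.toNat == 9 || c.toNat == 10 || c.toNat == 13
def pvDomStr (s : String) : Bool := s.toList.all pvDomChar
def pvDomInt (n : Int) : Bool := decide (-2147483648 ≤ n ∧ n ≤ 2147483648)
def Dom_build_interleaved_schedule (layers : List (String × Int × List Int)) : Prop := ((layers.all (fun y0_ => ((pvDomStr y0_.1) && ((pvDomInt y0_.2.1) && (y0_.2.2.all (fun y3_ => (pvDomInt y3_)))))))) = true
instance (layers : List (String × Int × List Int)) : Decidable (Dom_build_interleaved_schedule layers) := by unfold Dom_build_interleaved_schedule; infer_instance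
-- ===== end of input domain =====

-- B replaces A's double loop over the sorted part/layer universes (with a membership test per
-- pair) by a single direct sort of the existing keys by (layer_id, part_id) — simpler, and it
-- avoids scanning the full parts × layers grid.

-- ===== PORT A =====
-- the dict's keys, in insertion order (duplicate keys in the assoc list collapse as in a dict)
def pvKeys (layers : List (String × Int × List Int)) : PySem.Set (String × Int) :=
  PySem.Set.ofList (layers.map (fun x => (x.1, x.2.1)))

def build_interleaved_schedule (layers : List (String × Int × List Int)) : List (String × Int) :=
  let keys := pvKeys layers
  let parts := PySem.List.sorted (PySem.Set.ofList (keys.map Prod.fst)) (fun x => x)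
  let all_layer_ids := PySem.List.sorted (PySem.Set.ofList (keys.map (fun k => k.2))) (fun x => x)
  all_layer_ids.foldl (fun schedule layer_id =>
    parts.foldl (fun schedule part_id =>
      if PySem.Set.contains keys (part_id, layer_id) then schedule ++ [(part_id, layer_id)]
      else schedule) schedule) []

-- ===== PORT B =====
def build_interleaved_schedule_alt (layers : List (String × Int × List Int)) : List (String × Int) :=
  PySem.List.sorted2 (pvKeys layers) (fun key => key.2) (fun key => key.1)

-- ===== PRECONDITION & SPEC =====
def Spec_build_interleaved_schedule (layers : List (String × Int × List Int)) (out : List (String × Int)) : Prop := out = build_interleaved_schedule_alt layers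
instance (layers : List (String × Int × List Int)) (out : List (String × Int)) : Decidable (Spec_build_interleaved_schedule layers out) := by unfold Spec_build_interleaved_schedule; infer_instance

-- ===== CLAIM (what is proved, stated in full; the proofs are below) =====
def Claim_equal_build_interleaved_schedule : Prop := ∀ (layers : List (String × Int × List Int)), Dom_build_interleaved_schedule layers → Spec_build_interleaved_schedule layers (build_interleaved_schedule layers)

-- ===== LEMMAS AND PROOFS =====

-- the strict comparison sorted2 uses for the key (layer_id, part_id)
def pvBefore (a b : String × Int) : Bool :=
  decide (a.2 < b.2) || (!decide (b.2 < a.2) && decide (a.1 < b.1))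

theorem pvBefore_trans {a b c : String × Int} (h1 : pvBefore a b = true)
    (h2 : pvBefore b c = true) : pvBefore a c = true := by
  simp only [pvBefore, Bool.or_eq_true, Bool.and_eq_true, Bool.not_eq_eq_eq_not, Bool.not_true,
    decide_eq_true_eq, decide_eq_false_iff_not] at *
  rcases h1 with h1 | ⟨h1, h1'⟩ <;> rcases h2 with h2 | ⟨h2, h2'⟩
  · exact Or.inl (lt_trans h1 h2)
  · exact Or.inl (lt_of_lt_of_le h1 (not_lt.mp h2))
  · exact Or.inl (lt_of_le_of_lt (not_lt.mp h1) h2)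
  · exact Or.inr ⟨fun h => h2 (lt_of_lt_of_le h (not_lt.mp h1)), lt_trans h1' h2'⟩

theorem pvBefore_total {a b : String × Int} (hne : a ≠ b) :
    pvBefore a b = true ∨ pvBefore b a = true := by
  simp only [pvBefore, Bool.or_eq_true, Bool.and_eq_true, Bool.not_eq_eq_eq_not, Bool.not_true,
    decide_eq_true_eq, decide_eq_false_iff_not]
  rcases lt_trichotomy a.2 b.2 with h | h | h
  · exact Or.inl (Or.inl h)
  · rcases lt_trichotomy a.1 b.1 with h' | h' | h'
    · exact Or.inl (Or.inr ⟨by omega, h'⟩)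
    · exact absurd (Prod.ext h' h) hne
    · exact Or.inr (Or.inr ⟨by omega, h'⟩)
  · exact Or.inr (Or.inl h)

theorem pvBefore_asymm {a b : String × Int} (h1 : pvBefore a b = true)
    (h2 : pvBefore b a = true) : False := by
  simp only [pvBefore, Bool.or_eq_true, Bool.and_eq_true, Bool.not_eq_eq_eq_not, Bool.not_true,
    decide_eq_true_eq, decide_eq_false_iff_not] at *
  rcases h1 with h1 | ⟨h1, h1'⟩ <;> rcases h2 with h2 | ⟨h2, h2'⟩ <;>
    first
      | exact absurd h1 (not_lt.mpr (le_of_lt h2))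
      | exact h2 h1 | exact h1 h2
      | exact absurd h1' (not_lt.mpr (le_of_lt h2'))

theorem pv_insertBy_perm (x : String × Int) (ys : List (String × Int)) :
    (PySem.List.insertBy pvBefore x ys).Perm (x :: ys) := by
  induction ys with
  | nil => simp [PySem.List.insertBy]
  | cons y ys ih =>
    by_cases h : pvBefore x y = true
    · simp [PySem.List.insertBy, h]
    · simp only [PySem.List.insertBy, h]
      exact ((ih.cons y).trans (List.Perm.swap x y ys))

theorem pv_insertBy_pairwise (x : String × Int) (ys : List (String × Int))
    (hpw : ys.Pairwise (fun a b => pvBefore a b = true)) (hne : ∀ y ∈ ys, x ≠ y) :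
    (PySem.List.insertBy pvBefore x ys).Pairwise (fun a b => pvBefore a b = true) := by
  induction ys with
  | nil => simp [PySem.List.insertBy]
  | cons y ys ih =>
    rcases List.pairwise_cons.mp hpw with ⟨hy, hys⟩
    by_cases h : pvBefore x y = true
    · simp only [PySem.List.insertBy, h, if_true]
      refine List.pairwise_cons.mpr ⟨?_, hpw⟩
      intro z hz
      rcases List.mem_cons.mp hz with rfl | hz2
      · exact h
      · exact pvBefore_trans h (hy z hz2)
    · simp only [PySem.List.insertBy, h]
      have hrest := ih hys (fun z hz => hne z (List.mem_cons_of_mem y hz))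
      refine List.pairwise_cons.mpr ⟨fun z hmem => ?_, hrest⟩
      rcases (PySem.List.mem_insertBy pvBefore x z ys).mp hmem with hc | hc
      · rw [hc]
        rcases pvBefore_total (Ne.symm (hne y List.mem_cons_self)) with h' | h'
        · exact h'
        · exact absurd h' h
      · exact hy z hc

theorem pv_foldl_insertBy (xs : List (String × Int)) (acc : List (String × Int))
    (hpw : acc.Pairwise (fun a b => pvBefore a b = true)) (hnd : (acc ++ xs).Nodup) :
    (xs.foldl (fun a x => PySem.List.insertBy pvBefore x a) acc).Pairwise
        (fun a b => pvBefore a b = true) ∧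
      (xs.foldl (fun a x => PySem.List.insertBy pvBefore x a) acc).Perm (acc ++ xs) := by
  induction xs generalizing acc with
  | nil => exact ⟨hpw, by simp⟩
  | cons x xs ih =>
    have hperm : (PySem.List.insertBy pvBefore x acc).Perm (x :: acc) := pv_insertBy_perm x acc
    have hnd2 : (x :: (acc ++ xs)).Nodup :=
      (List.perm_middle (a := x) (l₁ := acc) (l₂ := xs)).nodup_iff.mp hnd
    have hxacc : x ∉ acc := fun hx =>
      (List.nodup_cons.mp hnd2).1 (List.mem_append_left _ hx)
    have hP : ((PySem.List.insertBy pvBefore x acc) ++ xs).Perm (acc ++ x :: xs) :=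
      (hperm.append_right xs).trans (List.perm_middle (a := x) (l₁ := acc) (l₂ := xs)).symm
    have hnd' : ((PySem.List.insertBy pvBefore x acc) ++ xs).Nodup := hP.nodup_iff.mpr hnd
    have hpw' := pv_insertBy_pairwise x acc hpw
      (fun y hy => fun he => hxacc (he ▸ hy))
    have hres := ih (PySem.List.insertBy pvBefore x acc) hpw' hnd'
    exact ⟨hres.1, hres.2.trans hP⟩

theorem pv_sorted2_eq (xs ys : List (String × Int)) (hnd : xs.Nodup)
    (hp : ys.Perm xs) (hpw : ys.Pairwise (fun a b => pvBefore a b = true)) :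
    PySem.List.sorted2 xs (fun k => k.2) (fun k => k.1) = ys := by
  have hfold := pv_foldl_insertBy xs [] (by simp) (by simpa using hnd)
  have hdef : PySem.List.sorted2 xs (fun k => k.2) (fun k => k.1) =
      xs.foldl (fun a x => PySem.List.insertBy pvBefore x a) [] := rfl
  rw [hdef]
  refine List.Perm.eq_of_pairwise ?_ hfold.1 hpw (by simpa using hfold.2.trans hp.symm)
  intro a b _ _ h1 h2
  exact absurd h2 (fun h2 => pvBefore_asymm h1 h2)

-- A's schedule as one expression: for each layer (ascending) the existing parts (ascending)
theorem pvA_eq_flatMap (layers : List (String × Int × List Int)) :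
    build_interleaved_schedule layers =
      (PySem.List.sorted (PySem.Set.ofList ((pvKeys layers).map (fun k => k.2))) (fun x => x)).flatMap
        (fun l => ((PySem.List.sorted (PySem.Set.ofList ((pvKeys layers).map Prod.fst)) (fun x => x)).filter
          (fun p => PySem.Set.contains (pvKeys layers) (p, l))).map (fun p => (p, l))) := by
  unfold build_interleaved_schedule
  simp only [PySem.List.foldl_append_if, PySem.List.foldl_append_eq_flatMap, List.nil_append]

theorem build_interleaved_schedule_spec_aux (layers : List (String × Int × List Int)) :
    build_interleaved_schedule layers = build_interleaved_schedule_alt layers := by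
  have hkeysnd : (pvKeys layers).Nodup := PySem.Set.nodup_ofList _
  set keys := pvKeys layers with hkeys
  set parts := PySem.List.sorted (PySem.Set.ofList (keys.map Prod.fst)) (fun x => x) with hparts
  set lids := PySem.List.sorted (PySem.Set.ofList (keys.map (fun k => k.2))) (fun x => x) with hlids
  have hpartslt : parts.Pairwise (· < ·) := PySem.List.sorted_ofList_pairwise_lt _
  have hlidslt : lids.Pairwise (· < ·) := PySem.List.sorted_ofList_pairwise_lt _
  have hmemparts : ∀ p l, (p, l) ∈ keys → p ∈ parts := by
    intro p l h
    rw [hparts, PySem.List.mem_sorted, PySem.Set.mem_ofList]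
    exact List.mem_map.mpr ⟨(p, l), h, rfl⟩
  have hmemlids : ∀ p l, (p, l) ∈ keys → l ∈ lids := by
    intro p l h
    rw [hlids, PySem.List.mem_sorted, PySem.Set.mem_ofList]
    exact List.mem_map.mpr ⟨(p, l), h, rfl⟩
  set ys := lids.flatMap
      (fun l => (parts.filter (fun p => PySem.Set.contains keys (p, l))).map (fun p => (p, l)))
    with hys
  have hmem : ∀ z, z ∈ ys ↔ z ∈ keys := by
    intro z
    obtain ⟨p, l⟩ := z
    constructor
    · intro h
      rcases List.mem_flatMap.mp h with ⟨l', _, hin⟩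
      rcases List.mem_map.mp hin with ⟨p', hp', he⟩
      obtain ⟨rfl, rfl⟩ : p' = p ∧ l' = l := by
        exact ⟨congrArg Prod.fst he, congrArg Prod.snd he⟩
      exact (PySem.Set.contains_iff _ _).mp (List.mem_filter.mp hp').2
    · intro h
      refine List.mem_flatMap.mpr ⟨l, hmemlids p l h, ?_⟩
      refine List.mem_map.mpr ⟨p, ?_, rfl⟩
      exact List.mem_filter.mpr ⟨hmemparts p l h, (PySem.Set.contains_iff _ _).mpr h⟩
  have hysnd : ys.Nodup := by
    rw [hys, List.nodup_flatMap]
    constructor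
    · intro l _
      refine List.Nodup.map ?_ (List.Nodup.filter _ (hpartslt.imp ne_of_lt))
      intro a b he
      exact congrArg Prod.fst he
    · refine hlidslt.imp ?_
      intro a b hab
      simp only [Function.onFun, List.disjoint_left]
      rintro ⟨p, l⟩ ha hb
      rcases List.mem_map.mp ha with ⟨_, _, hea⟩
      rcases List.mem_map.mp hb with ⟨_, _, heb⟩
      have h1 : l = a := (congrArg Prod.snd hea).symm
      have h2 : l = b := (congrArg Prod.snd heb).symm
      exact absurd (h1 ▸ h2) (ne_of_lt hab)
  have hyspw : ys.Pairwise (fun a b => pvBefore a b = true) := by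
    rw [hys, List.pairwise_flatMap]
    constructor
    · intro l _
      refine List.Pairwise.map _ ?_ (List.Pairwise.filter _ hpartslt)
      intro a b hab
      simp [pvBefore, hab]
    · refine hlidslt.imp ?_
      intro a b hab x hx y hy
      rcases List.mem_map.mp hx with ⟨_, _, hea⟩
      rcases List.mem_map.mp hy with ⟨_, _, heb⟩
      have h1 : x.2 = a := (congrArg Prod.snd hea).symm
      have h2 : y.2 = b := (congrArg Prod.snd heb).symm
      simp [pvBefore, h1, h2, hab]
  have hperm : ys.Perm keys :=
    (List.perm_ext_iff_of_nodup hysnd hkeysnd).mpr hmem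
  rw [pvA_eq_flatMap]
  unfold build_interleaved_schedule_alt
  rw [← hkeys, ← hlids, ← hparts, ← hys]
  exact (pv_sorted2_eq keys ys hkeysnd hperm hyspw).symm

-- ===== VERDICT (by name: the statement is the Claim_ definition above) =====
theorem build_interleaved_schedule_spec : Claim_equal_build_interleaved_schedule := by
  intro layers _
  unfold Spec_build_interleaved_schedule
  exact build_interleaved_schedule_spec_aux layers
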